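-- pv_equiv track=rewrite | github.com/ajamidar/DSA-Practice | HSBC/Q3.py | solution
-- ===== SOURCE A (Python) =====
-- def solution(S):
--     # Count digit frequencies
--     counts = [0] * 10
--     for ch in S:
--         counts[ord(ch) - 48] += 1
--
--     left_parts = []
--     nonzero_pairs = 0
--
--     # Use non-zero pairs for the left half (from high to low)
--     for d in range(9, 0, -1):
--         pairs = counts[d] // 2
--         if pairs:
--             left_parts.append(str(d) * pairs)
--             nonzero_pairs += pairs
--
--     # If we have at least one non-zero pair, we can safely add zero pairs at the end
--     if nonzero_pairs > 0:
--         zero_pairs = counts[0] // 2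
--         if zero_pairs:
--             left_parts.append('0' * zero_pairs)
--
--         left = ''.join(left_parts)
--
--         # Pick the highest digit with an odd count as the center (if any)
--         center = ''
--         for d in range(9, -1, -1):
--             if counts[d] % 2 == 1:
--                 center = str(d)
--                 break
--
--         right = left[::-1]
--         return left + center + right
--
--     # No non-zero pairs available -> best valid palindrome is a single highest digit
--     for d in range(9, -1, -1):
--         if counts[d] > 0:
--             return str(d)
--
--     # Should not reach here as S has at least one digit
--     return ""
-- ===== SOURCE B (Python) =====
-- def solution(S):
--     # Sort-and-pair: parse digits, sort descending, pair adjacent equal digits once.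
--     digits = sorted(map(int, S))[::-1]
--     half = []
--     leftover = []
--     i = 0
--     while i < len(digits):
--         if i + 1 < len(digits) and digits[i] == digits[i + 1]:
--             half.append(digits[i])
--             i += 2
--         else:
--             leftover.append(digits[i])
--             i += 1
--     if half and half[0] != 0:
--         mid = str(leftover[0]) if leftover else ''
--         left = ''.join(str(d) for d in half)
--         return left + mid + left[::-1]
--     return str(digits[0]) if digits else ''
-- ===== Notes on version B (the rewrite author's own statement) =====
-- stated objective: alternative
-- what changed: Replaces the 10-slot frequency-counting pass plus three digit-range scans by parse-sort-descending-then-pair-adjacent: one sweep over the sorted digits builds the half and the leftover list at once, the head of the half decides the leading-zero guard and leftover[0] is the center.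
-- outside the precondition, e.g. on solution('&'): A returns '0', B raises ValueError; on solution('/'): A returns '9', B raises ValueError; on solution('(0('): A returns '202', B raises ValueError
import Mathlib
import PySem

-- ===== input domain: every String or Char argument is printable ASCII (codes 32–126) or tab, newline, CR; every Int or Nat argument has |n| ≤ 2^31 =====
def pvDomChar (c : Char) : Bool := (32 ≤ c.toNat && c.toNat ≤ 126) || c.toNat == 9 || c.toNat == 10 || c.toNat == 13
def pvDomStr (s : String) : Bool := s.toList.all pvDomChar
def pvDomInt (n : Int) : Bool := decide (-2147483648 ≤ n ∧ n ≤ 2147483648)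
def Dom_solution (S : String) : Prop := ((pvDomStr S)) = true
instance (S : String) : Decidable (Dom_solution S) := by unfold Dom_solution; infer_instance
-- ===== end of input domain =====

-- B replaces A's 10-slot frequency count plus three digit-range scans by one
-- sort-descending-then-pair-adjacent sweep (alternative algorithm, not claimed faster).

-- ===== PORT A =====
-- counts[ord(ch)-48] += 1 over S (Python index semantics, negative indices wrap)
def countsOf (l : List Char) : List Int :=
  l.foldl
    (fun cs ch =>
      PySem.List.pySetD cs ((ch.toNat : Int) - 48)
        (PySem.List.pyGetD cs ((ch.toNat : Int) - 48) 0 + 1))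
    (List.replicate 10 (0 : Int))

def solution (S : String) : String :=
  let counts := countsOf S.toList
  -- for d in range(9, 0, -1): pairs = counts[d] // 2; if pairs: append str(d)*pairs; nonzero_pairs += pairs
  let lp := (PySem.List.pyRange 9 0 (-1)).foldl
    (fun (acc : List String × Int) d =>
      let pairs := PySem.Int.floordiv (PySem.List.pyGetD counts d 0) 2
      if pairs ≠ 0 then
        (acc.1 ++ [String.ofList (PySem.List.pyRepeat (PySem.Int.toStr d).toList pairs)],
         acc.2 + pairs)
      else acc)
    ([], 0)
  if lp.2 > 0 then
    let zero_pairs := PySem.Int.floordiv (PySem.List.pyGetD counts 0 0) 2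
    let left_parts :=
      if zero_pairs ≠ 0 then
        lp.1 ++ [String.ofList (PySem.List.pyRepeat ['0'] zero_pairs)]
      else lp.1
    let left := PySem.Str.join "" left_parts
    -- for d in range(9, -1, -1): if counts[d] % 2 == 1: center = str(d); break
    let center : String :=
      match (PySem.List.pyRange 9 (-1) (-1)).find?
          (fun d => PySem.Int.mod (PySem.List.pyGetD counts d 0) 2 == 1) with
      | some d => PySem.Int.toStr d
      | none => ""
    let right := String.ofList left.toList.reverse   -- left[::-1]
    String.ofList (left.toList ++ center.toList ++ right.toList)
  else
    -- for d in range(9, -1, -1): if counts[d] > 0: return str(d)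
    match (PySem.List.pyRange 9 (-1) (-1)).find?
        (fun d => decide (0 < PySem.List.pyGetD counts d 0)) with
    | some d => PySem.Int.toStr d
    | none => ""

-- ===== PORT B =====
-- int(c) for one character; int() raises ValueError outside Pre_, where this total port returns 0
def pyCharInt (c : Char) : Int := (PySem.Int.ofStr? (String.ofList [c])).getD 0

-- the index sweep of Source B: pair digits[i] with digits[i+1] when equal (advance 2), else leftover (advance 1)
def pairHalf : List Int → List Int × List Int
  | [] => ([], [])
  | [c] => ([], [c])
  | c :: d :: rest =>
    if c == d then
      let r := pairHalf rest
      (c :: r.1, r.2)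
    else
      let r := pairHalf (d :: rest)
      (r.1, c :: r.2)

def solution_alt (S : String) : String :=
  let digits := (PySem.List.sorted (S.toList.map pyCharInt) (fun x => x) false).reverse   -- sorted(map(int,S))[::-1]
  let hl := pairHalf digits
  let fallback : String :=   -- str(digits[0]) if digits else ''
    match digits with
    | [] => ""
    | d0 :: _ => PySem.Int.toStr d0
  match hl.1 with
  | [] => fallback
  | d :: _ =>
    if d ≠ 0 then
      let mid : String :=   -- str(leftover[0]) if leftover else ''
        match hl.2 with
        | [] => ""
        | m0 :: _ => PySem.Int.toStr m0
      let left := PySem.Str.join "" (hl.1.map PySem.Int.toStr)   -- ''.join(str(d) for d in half)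
      String.ofList (left.toList ++ mid.toList ++ left.toList.reverse)   -- left + mid + left[::-1]
    else fallback

-- ===== PRECONDITION & SPEC =====
-- Pre_ excludes strings with non-digit characters: A raises IndexError on most of them, and on
-- the band '&'..'/' Python's negative-index wraparound accidentally counts them as digits 0-9 —
-- a corner no caller of this digit-palindrome task would specify; B treats those chars literally.
def Pre_solution (S : String) : Prop := S.toList.all Char.isDigit = true
instance (S : String) : Decidable (Pre_solution S) := by unfold Pre_solution; infer_instance
def pvWitness_solution : String := "4321"

def Spec_solution (S : String) (out : String) : Prop := out = solution_alt S
instance (S : String) (out : String) : Decidable (Spec_solution S out) := by unfold Spec_solution; infer_instance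

-- ===== CLAIM (what is proved, stated in full; the proofs are below) =====
def Claim_equal_solution : Prop := ∀ (S : String), Dom_solution S → Pre_solution S → Spec_solution S (solution S)

-- ===== LEMMAS AND PROOFS =====

-- digit d (0 ≤ d ≤ 9) as a character, and the digit lists scanned by both programs
def dch (d : Nat) : Char := Char.ofNat (48 + d)
def descD : List Nat := [9, 8, 7, 6, 5, 4, 3, 2, 1, 0]
def descD' : List Nat := [9, 8, 7, 6, 5, 4, 3, 2, 1]
def cntD (S : String) (d : Nat) : Nat := S.toList.count (dch d)

theorem dch_inj : ∀ k < 10, ∀ e < 10, (dch k = dch e ↔ k = e) := by decide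
theorem toStr_dch : ∀ k < 10, (PySem.Int.toStr (k : Nat)).toList = [dch k] := by decide
theorem descD_lt : ∀ d ∈ descD, d < 10 := by decide
theorem mem_descD' : ∀ d < 10, d ≠ 0 → d ∈ descD' := by decide
theorem descD'_sub : ∀ d ∈ descD', d ∈ descD := by decide
theorem descD_gt : descD.Pairwise (· > ·) := by decide
theorem descD'_lt : ∀ d ∈ descD', d < 10 ∧ d ≠ 0 := by decide

theorem isDigit_code {c : Char} (h : c.isDigit) : 48 ≤ c.toNat ∧ c.toNat ≤ 57 := by
  simpa [Char.isDigit, Char.le_def] using h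

theorem eq_dch_of_isDigit {c : Char} (h : c.isDigit) :
    c = dch (c.toNat - 48) ∧ c.toNat - 48 < 10 := by
  have h1 := isDigit_code h
  constructor
  · have : 48 + (c.toNat - 48) = c.toNat := by omega
    rw [dch, this, Char.ofNat_toNat]
  · omega

-- ---- A-side: the counting loop computes the digit counts ----

theorem set_map_range (g : Nat → Int) (e : Nat) (v : Int) (n : Nat) :
    ((List.range n).map g).set e v = (List.range n).map (fun k => if k = e then v else g k) := by
  apply List.ext_getElem (by simp)
  intro i h1 h2
  rw [List.getElem_set]
  simp only [List.getElem_map, List.getElem_range]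
  by_cases h : i = e
  · subst h; simp
  · simp [h, Ne.symm h]

theorem counts_go : ∀ (l : List Char) (g : Nat → Int), (∀ c ∈ l, c.isDigit) →
    l.foldl
      (fun cs ch =>
        PySem.List.pySetD cs ((ch.toNat : Int) - 48)
          (PySem.List.pyGetD cs ((ch.toNat : Int) - 48) 0 + 1))
      ((List.range 10).map g)
    = (List.range 10).map (fun k => g k + (l.count (dch k) : Int)) := by
  intro l
  induction l with
  | nil => intro g _; simp
  | cons ch t ih =>
    intro g hd
    have hch := eq_dch_of_isDigit (hd ch (by simp))
    set e := ch.toNat - 48 with he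
    have he10 : e < 10 := hch.2
    have hcast : ((ch.toNat : Int) - 48) = ((e : Nat) : Int) := by
      have := (isDigit_code (hd ch (by simp))).1
      omega
    rw [List.foldl_cons, hcast, PySem.List.pySetD_natCast,
        PySem.List.pyGetD_natCast]
    have hget : ((List.range 10).map g).getD e 0 = g e := by
      rw [List.getD_eq_getElem?_getD]
      simp [he10]
    rw [hget, set_map_range]
    rw [ih _ (fun c hc => hd c (by simp [hc]))]
    apply List.map_congr_left
    intro k hk
    have hk10 : k < 10 := List.mem_range.mp hk
    rw [hch.1, List.count_cons]
    by_cases hke : k = e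
    · subst hke; simp; omega
    · have hne : dch e ≠ dch k := fun hh => hke ((dch_inj k hk10 e he10).mp hh.symm)
      simp [hke, hne]

theorem counts_eq (S : String) (hd : ∀ c ∈ S.toList, c.isDigit) :
    countsOf S.toList = (List.range 10).map (fun k => (cntD S k : Int)) := by
  have h0 : (List.replicate 10 (0 : Int)) = (List.range 10).map (fun _ => (0 : Int)) := by decide
  rw [countsOf, h0, counts_go S.toList _ hd]
  simp [cntD]

-- ---- generic loop-shape lemmas ----

theorem foldA (p : Int → Int) (m : Int → String) :
    ∀ (ds : List Int) (acc : List String × Int),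
    ds.foldl (fun acc d => if p d ≠ 0 then (acc.1 ++ [m d], acc.2 + p d) else acc) acc
      = (acc.1 ++ ds.filterMap (fun d => if p d ≠ 0 then some (m d) else none),
         acc.2 + (ds.map p).sum) := by
  intro ds
  induction ds with
  | nil => intro acc; simp
  | cons d t ih =>
    intro acc
    rw [List.foldl_cons, ih]
    by_cases h : p d = 0
    · simp [h]
    · simp [h, List.filterMap_cons]
      ring

theorem flatten_filterMap (p : Int → Int) (m : Int → String) (F : Int → List Char) :
    ∀ ds : List Int, (∀ d ∈ ds, (m d).toList = F d) → (∀ d ∈ ds, p d = 0 → F d = []) →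
    ((ds.filterMap (fun d => if p d ≠ 0 then some (m d) else none)).map String.toList).flatten
      = ds.flatMap F := by
  intro ds
  induction ds with
  | nil => intro _ _; simp
  | cons d t ih =>
    intro hm h0
    rw [List.filterMap_cons, List.flatMap_cons]
    by_cases h : p d = 0
    · simp only [h, ne_eq, not_true_eq_false, if_false]
      rw [h0 d (by simp) h, ih (fun x hx => hm x (by simp [hx])) (fun x hx => h0 x (by simp [hx]))]
      simp
    · simp only [h, ne_eq, not_false_eq_true, if_true]
      rw [List.map_cons, List.flatten_cons, hm d (by simp),
          ih (fun x hx => hm x (by simp [hx])) (fun x hx => h0 x (by simp [hx]))]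

theorem sum_pos_of_mem {α : Type} (p : α → Int) :
    ∀ ds : List α, (∀ d ∈ ds, 0 ≤ p d) → ∀ d ∈ ds, 0 < p d → 0 < (ds.map p).sum := by
  intro ds
  induction ds with
  | nil => intro _ d hd; simp at hd
  | cons a t ih =>
    intro hnn d hd hpd
    rw [List.map_cons, List.sum_cons]
    have ht : 0 ≤ (t.map p).sum := List.sum_nonneg (by
      intro x hx
      rcases List.mem_map.mp hx with ⟨y, hy, rfl⟩
      exact hnn y (by simp [hy]))
    rcases List.mem_cons.mp hd with rfl | hd'
    · omega
    · have := ih (fun x hx => hnn x (by simp [hx])) d hd' hpd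
      have hna := hnn a (by simp)
      omega

theorem joinNilFlatten : ∀ ls : List (List Char), PySem.Chars.join [] ls = ls.flatten
  | [] => PySem.Chars.join_nil []
  | [a] => by simp [PySem.Chars.join_singleton]
  | a :: b :: t => by
    rw [PySem.Chars.join_cons_cons, joinNilFlatten (b :: t)]
    simp

theorem find?_first (q : Nat → Bool) :
    ∀ (ds : List Nat), ds.Pairwise (· > ·) → ∀ d, ds.find? q = some d →
      ∀ e ∈ ds, d < e → q e = false := by
  intro ds
  induction ds with
  | nil => intro _ d hf; simp at hf
  | cons a t ih =>
    intro hp d hf e he hde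
    rcases List.pairwise_cons.mp hp with ⟨ha, ht⟩
    by_cases hqa : q a = true
    · rw [List.find?_cons_of_pos hqa] at hf
      have hda : d = a := by simpa using hf.symm
      rcases List.mem_cons.mp he with rfl | he'
      · omega
      · exact absurd (ha e he') (by omega)
    · rw [List.find?_cons_of_neg (by simpa using hqa)] at hf
      rcases List.mem_cons.mp he with rfl | he'
      · simpa using hqa
      · exact ih ht d hf e he' hde

theorem find?_congr_mem (p q : Nat → Bool) :
    ∀ ds : List Nat, (∀ d ∈ ds, p d = q d) → ds.find? p = ds.find? q := by
  intro ds
  induction ds with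
  | nil => intro _; rfl
  | cons a t ih =>
    intro h
    by_cases hpa : p a = true
    · rw [List.find?_cons_of_pos hpa, List.find?_cons_of_pos (by rw [← h a (by simp)]; exact hpa)]
    · rw [List.find?_cons_of_neg (by simpa using hpa),
          List.find?_cons_of_neg (by rw [← h a (by simp)]; simpa using hpa)]
      exact ih (fun x hx => h x (by simp [hx]))

theorem cons_of_head? {α : Type} {l : List α} {a : α} (h : l.head? = some a) :
    ∃ t, l = a :: t := by
  cases l with
  | nil => simp at h
  | cons b t => exact ⟨t, by simp_all⟩

-- ---- B-side: flatMap/replicate shape lemmas ----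

theorem head?_flatMap_rep (c : Nat → Int) (h : Nat → Nat) :
    ∀ ds : List Nat,
    (ds.flatMap (fun d => List.replicate (h d) (c d))).head?
      = (ds.find? (fun d => h d != 0)).map c := by
  intro ds
  induction ds with
  | nil => simp
  | cons d t ih =>
    cases hd : h d with
    | zero =>
      rw [List.flatMap_cons, hd, List.find?_cons_of_neg (by simp [hd])]
      simpa using ih
    | succ n =>
      rw [List.flatMap_cons, hd, List.find?_cons_of_pos (by simp [hd])]
      simp [List.replicate_succ]

theorem head?_filterMap (c : Nat → Int) (q : Nat → Prop) [DecidablePred q] :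
    ∀ ds : List Nat,
    (ds.filterMap (fun d => if q d then some (c d) else none)).head?
      = (ds.find? (fun d => decide (q d))).map c := by
  intro ds
  induction ds with
  | nil => simp
  | cons d t ih =>
    by_cases hd : q d
    · rw [List.filterMap_cons, List.find?_cons_of_pos (by simp [hd])]
      simp [hd]
    · rw [List.filterMap_cons, List.find?_cons_of_neg (by simp [hd])]
      simpa [hd] using ih

theorem pairHalf_rep (c : Int) :
    ∀ n (rest : List Int), (∀ x, rest.head? = some x → x ≠ c) →
    pairHalf (List.replicate n c ++ rest)
      = (List.replicate (n / 2) c ++ (pairHalf rest).1,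
         (if n % 2 = 1 then [c] else []) ++ (pairHalf rest).2) := by
  intro n
  induction n using Nat.strong_induction_on with
  | _ n ih =>
    intro rest hr
    match n with
    | 0 => simp
    | 1 =>
      cases rest with
      | nil => simp [pairHalf]
      | cons x xs =>
        have hx : x ≠ c := hr x (by simp)
        have hbeq : (c == x) = false := by simp [hx.symm]
        simp [pairHalf, hbeq]
    | (m + 2) =>
      have hrep : List.replicate (m + 2) c ++ rest = c :: c :: (List.replicate m c ++ rest) := by
        simp [List.replicate_succ]
      rw [hrep, pairHalf]
      simp only [BEq.rfl, if_true]
      rw [ih m (by omega) rest hr]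
      have h1 : (m + 2) / 2 = m / 2 + 1 := by omega
      have h2 : (m + 2) % 2 = m % 2 := by omega
      rw [h1, h2]
      simp [List.replicate_succ]

theorem pairHalf_flatMap (c : Nat → Int) (h : Nat → Nat) :
    ∀ ds : List Nat, (ds.map c).Pairwise (· ≠ ·) →
    pairHalf (ds.flatMap (fun d => List.replicate (h d) (c d)))
      = (ds.flatMap (fun d => List.replicate (h d / 2) (c d)),
         ds.filterMap (fun d => if h d % 2 = 1 then some (c d) else none)) := by
  intro ds
  induction ds with
  | nil => simp [pairHalf]
  | cons d t ih =>
    intro hp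
    rw [List.map_cons] at hp
    rcases List.pairwise_cons.mp hp with ⟨hne, ht⟩
    have hhead : ∀ x, (t.flatMap (fun d => List.replicate (h d) (c d))).head? = some x → x ≠ c d := by
      intro x hx
      rw [head?_flatMap_rep] at hx
      rcases Option.map_eq_some_iff.mp hx with ⟨d', hd', rfl⟩
      have hd'm : d' ∈ t := List.mem_of_find?_eq_some hd'
      exact fun hcc => (hne (c d') (List.mem_map_of_mem hd'm)) hcc.symm
    rw [List.flatMap_cons, pairHalf_rep (c d) (h d) _ hhead, ih ht]
    rw [List.flatMap_cons, List.filterMap_cons]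
    by_cases hodd : h d % 2 = 1 <;> simp [hodd]

-- ---- sorted digits = ascending blocks ----

def ascD : List Nat := [0, 1, 2, 3, 4, 5, 6, 7, 8, 9]

theorem count_flatMap_rep (a : Int) (c : Nat → Int) (h : Nat → Nat) :
    ∀ ds : List Nat,
    (ds.flatMap (fun d => List.replicate (h d) (c d))).count a
      = (ds.map (fun d => if c d = a then h d else 0)).sum := by
  intro ds
  induction ds with
  | nil => simp
  | cons d t ih =>
    rw [List.flatMap_cons, List.count_append, ih, List.map_cons, List.sum_cons]
    congr 1
    by_cases hca : c d = a
    · simp [hca, List.count_replicate_self]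
    · have hac : a ≠ c d := fun hh => hca hh.symm
      rw [List.count_replicate]
      simp [hca, hac]

theorem sum_if_cast (e : Nat) (h : Nat → Nat) :
    ∀ ds : List Nat, ds.Nodup →
    (ds.map (fun d => if ((d : Nat) : Int) = ((e : Nat) : Int) then h d else 0)).sum
      = if e ∈ ds then h e else 0 := by
  intro ds
  induction ds with
  | nil => simp
  | cons d t ih =>
    intro hnd
    rw [List.map_cons, List.sum_cons, ih hnd.of_cons]
    have hiff : ((d : Nat) : Int) = ((e : Nat) : Int) ↔ d = e := Nat.cast_inj
    by_cases hde : d = e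
    · subst hde
      have : d ∉ t := (List.nodup_cons.mp hnd).1
      simp [hiff, this]
    · have : (e ∈ d :: t) ↔ e ∈ t := by simp [Ne.symm hde]
      simp [hiff, hde, this]

theorem sum_zero_of_no_cast (a : Int) (ha : ∀ e < 10, a ≠ ((e : Nat) : Int)) (h : Nat → Nat) :
    ∀ ds : List Nat, (∀ d ∈ ds, d < 10) →
    (ds.map (fun d => if ((d : Nat) : Int) = a then h d else 0)).sum = 0 := by
  intro ds
  induction ds with
  | nil => simp
  | cons d t ih =>
    intro hlt
    rw [List.map_cons, List.sum_cons, ih (fun x hx => hlt x (by simp [hx]))]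
    have : ((d : Nat) : Int) ≠ a := fun hda => ha d (hlt d (by simp)) hda.symm
    simp [this]

theorem pyCharInt_dch : ∀ k < 10, pyCharInt (dch k) = ((k : Nat) : Int) := by decide

theorem count_map_pyCharInt (e : Nat) (he : e < 10) :
    ∀ l : List Char, (∀ c ∈ l, c.isDigit) →
    (l.map pyCharInt).count ((e : Nat) : Int) = l.count (dch e) := by
  intro l
  induction l with
  | nil => intro _; simp
  | cons c t ih =>
    intro hd
    rcases eq_dch_of_isDigit (hd c (by simp)) with ⟨hck, hk10⟩
    rw [List.map_cons, List.count_cons, List.count_cons, ih (fun x hx => hd x (by simp [hx]))]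
    congr 1
    rw [hck, pyCharInt_dch _ hk10]
    by_cases hke : c.toNat - 48 = e
    · simp [hke]
    · have h2 : dch (c.toNat - 48) ≠ dch e := fun hh => hke ((dch_inj _ hk10 e he).mp hh)
      simp [hke, h2]

theorem count_map_pyCharInt_zero (a : Int) (ha : ∀ e < 10, a ≠ ((e : Nat) : Int)) :
    ∀ l : List Char, (∀ c ∈ l, c.isDigit) → (l.map pyCharInt).count a = 0 := by
  intro l hd
  rw [List.count_eq_zero]
  intro hmem
  rcases List.mem_map.mp hmem with ⟨c, hc, rfl⟩
  rcases eq_dch_of_isDigit (hd c hc) with ⟨hck, hk10⟩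
  refine ha _ hk10 ?_
  conv_lhs => rw [hck]
  rw [pyCharInt_dch _ hk10]

theorem perm_ascFlat (S : String) (hd : ∀ c ∈ S.toList, c.isDigit) :
    (ascD.flatMap (fun d => List.replicate (cntD S d) ((d : Nat) : Int))).Perm
      (S.toList.map pyCharInt) := by
  rw [List.perm_iff_count]
  intro a
  rw [count_flatMap_rep]
  by_cases ha : ∃ e, e < 10 ∧ a = ((e : Nat) : Int)
  · rcases ha with ⟨e, he10, rfl⟩
    rw [sum_if_cast e _ ascD (by decide)]
    have hmem : e ∈ ascD := by
      have h10 : ∀ e < 10, e ∈ ascD := by decide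
      exact h10 _ he10
    rw [if_pos hmem, count_map_pyCharInt e he10 S.toList hd]
    rfl
  · push_neg at ha
    rw [sum_zero_of_no_cast a (fun e he hae => ha e he hae) _ ascD (by decide),
        count_map_pyCharInt_zero a (fun e he hae => ha e he hae) S.toList hd]

theorem pairwise_le_ascFlat (h : Nat → Nat) :
    (ascD.flatMap (fun d => List.replicate (h d) ((d : Nat) : Int))).Pairwise (· ≤ ·) := by
  have key : ∀ ds : List Nat, (ds.map (fun d => ((d : Nat) : Int))).Pairwise (· < ·) →
      (ds.flatMap (fun d => List.replicate (h d) ((d : Nat) : Int))).Pairwise (· ≤ ·) := by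
    intro ds
    induction ds with
    | nil => intro _; simp
    | cons d t ih =>
      intro hp
      rw [List.map_cons] at hp
      rcases List.pairwise_cons.mp hp with ⟨hlt, ht⟩
      rw [List.flatMap_cons]
      refine List.pairwise_append.mpr ⟨?_, ?_, ?_⟩
      · exact List.pairwise_replicate.mpr (Or.inr (le_refl _))
      · exact ih ht
      · intro x hx y hy
        have hxd : x = ((d : Nat) : Int) := List.eq_of_mem_replicate hx
        rcases List.mem_flatMap.mp hy with ⟨d', hd', hy'⟩
        have hyd : y = ((d' : Nat) : Int) := List.eq_of_mem_replicate hy'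
        rw [hxd, hyd]
        exact le_of_lt (hlt _ (List.mem_map_of_mem hd'))
  exact key ascD (by decide)

theorem sorted_digits (S : String) (hd : ∀ c ∈ S.toList, c.isDigit) :
    PySem.List.sorted (S.toList.map pyCharInt) (fun x => x) false
      = ascD.flatMap (fun d => List.replicate (cntD S d) ((d : Nat) : Int)) := by
  apply PySem.List.sorted_id_eq_of_perm_of_pairwise
  · exact perm_ascFlat S hd
  · exact pairwise_le_ascFlat _

theorem digits_desc (S : String) (hd : ∀ c ∈ S.toList, c.isDigit) :
    (PySem.List.sorted (S.toList.map pyCharInt) (fun x => x) false).reverse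
      = descD.flatMap (fun d => List.replicate (cntD S d) ((d : Nat) : Int)) := by
  rw [sorted_digits S hd, List.reverse_flatMap]
  have : ascD.reverse = descD := by decide
  rw [this]
  congr 1
  funext d
  exact List.reverse_replicate

theorem flatten_map {α β : Type} (f : α → List β) : ∀ l : List α, (l.map f).flatten = l.flatMap f := by
  intro l; induction l <;> simp_all

theorem flatMap_assoc' {α β γ : Type} (f : α → List β) (g : β → List γ) :
    ∀ l : List α, (l.flatMap f).flatMap g = l.flatMap (fun x => (f x).flatMap g) := by
  intro l; induction l <;> simp_all

theorem flatMap_congr_mem {α β : Type} (f g : α → List β) :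
    ∀ l : List α, (∀ a ∈ l, f a = g a) → l.flatMap f = l.flatMap g := by
  intro l
  induction l with
  | nil => intro _; rfl
  | cons a t ih =>
    intro h
    rw [List.flatMap_cons, List.flatMap_cons, h a (by simp), ih (fun x hx => h x (by simp [hx]))]

theorem flatMap_replicate_one {α β : Type} (x : α) (c : β) (g : α → List β) (h : g x = [c]) :
    ∀ n, (List.replicate n x).flatMap g = List.replicate n c := by
  intro n
  induction n with
  | zero => simp
  | succ m ih => simp [List.replicate_succ, h, ih]

-- ---- bridging casts ----

theorem beq_cast_one (n : Nat) : (((n : Nat) : Int) == 1) = decide (n = 1) := by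
  by_cases h : n = 1 <;> simp [h]

theorem decide_pos_cast (n : Nat) : decide ((0 : Int) < (n : Nat)) = (n != 0) := by
  by_cases h : n = 0
  · subst h; simp
  · have h1 : (0 : Int) < (n : Nat) := by exact_mod_cast Nat.pos_of_ne_zero h
    simp [h, Nat.pos_of_ne_zero h]

-- ===== MAIN PROOF =====

theorem solution_eq_alt (S : String) (hPre : ∀ c ∈ S.toList, c.isDigit) :
    solution S = solution_alt S := by
  have hc := counts_eq S hPre
  have hdig := digits_desc S hPre
  have hpair := pairHalf_flatMap Nat.cast (cntD S) descD (by decide)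
  have hr1 : PySem.List.pyRange 9 0 (-1) = descD'.map Nat.cast := by decide
  have hr2 : PySem.List.pyRange 9 (-1) (-1) = descD.map Nat.cast := by decide
  have hget : ∀ k, k < 10 →
      PySem.List.pyGetD ((List.range 10).map (fun k => ((cntD S k : Nat) : Int))) ((k : Nat) : Int) 0
        = ((cntD S k : Nat) : Int) := by
    intro k hk
    rw [PySem.List.pyGetD_natCast, List.getD_eq_getElem?_getD]
    simp [hk]
  simp only [solution, solution_alt]
  rw [hc, hdig, hpair, hr1, hr2]
  rw [foldA]
  simp only [List.map_map, List.nil_append, zero_add]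
  -- cast bridges
  have h2cast : ((2 : Nat) : Int) = 2 := by norm_num
  have hfd : ∀ n : Nat, PySem.Int.floordiv ((n : Nat) : Int) 2 = ((n / 2 : Nat) : Int) := by
    intro n; rw [← h2cast, PySem.Int.floordiv_natCast]
  have hmd : ∀ n : Nat, PySem.Int.mod ((n : Nat) : Int) 2 = ((n % 2 : Nat) : Int) := by
    intro n; rw [← h2cast, PySem.Int.mod_natCast]
  have hget0 : PySem.List.pyGetD (List.map (fun k => ((cntD S k : Nat) : Int)) (List.range 10)) 0 0
      = ((cntD S 0 : Nat) : Int) := by simpa using hget 0 (by omega)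
  rw [hget0, hfd (cntD S 0)]
  have hb : List.map
      ((fun d => PySem.Int.floordiv (PySem.List.pyGetD (List.map (fun k => ((cntD S k : Nat) : Int)) (List.range 10)) d 0) 2) ∘ Nat.cast) descD'
      = List.map (fun k => ((cntD S k / 2 : Nat) : Int)) descD' := by
    apply List.map_congr_left
    intro k hk
    have hk10 : k < 10 := (descD'_lt k hk).1
    simp only [Function.comp_apply]
    rw [hget k hk10, hfd]
  rw [hb]
  have hjoin : ∀ parts : List String,
      (PySem.Str.join "" parts).toList = (parts.map String.toList).flatten := by
    intro parts
    rw [PySem.Str.toList_join]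
    simpa using joinNilFlatten (parts.map String.toList)
  rw [hjoin]
  rw [apply_ite (fun l : List String => (List.map String.toList l).flatten)]
  simp only [List.map_append, List.flatten_append, List.map_cons, List.map_nil,
    List.flatten_cons, List.flatten_nil, List.append_nil]
  have hm : ∀ d ∈ (List.map Nat.cast descD' : List Int),
      (String.ofList (PySem.List.pyRepeat (PySem.Int.toStr d).toList
          (PySem.Int.floordiv (PySem.List.pyGetD (List.map (fun k => ((cntD S k : Nat) : Int)) (List.range 10)) d 0) 2))).toList
        = List.replicate (cntD S d.toNat / 2) (dch d.toNat) := by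
    intro d hd
    rcases List.mem_map.mp hd with ⟨k, hk, rfl⟩
    have hk10 : k < 10 := (descD'_lt k hk).1
    rw [hget k hk10, hfd, toStr_dch k hk10, PySem.List.pyRepeat_singleton]
    simp
    omega
  have h0 : ∀ d ∈ (List.map Nat.cast descD' : List Int),
      PySem.Int.floordiv (PySem.List.pyGetD (List.map (fun k => ((cntD S k : Nat) : Int)) (List.range 10)) d 0) 2 = 0 →
      List.replicate (cntD S d.toNat / 2) (dch d.toNat) = [] := by
    intro d hd h0'
    rcases List.mem_map.mp hd with ⟨k, hk, rfl⟩
    have hk10 : k < 10 := (descD'_lt k hk).1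
    rw [hget k hk10, hfd] at h0'
    have hz : cntD S k / 2 = 0 := by exact_mod_cast h0'
    simp [hz]
  have hflat := flatten_filterMap
    (fun d => PySem.Int.floordiv (PySem.List.pyGetD (List.map (fun k => ((cntD S k : Nat) : Int)) (List.range 10)) d 0) 2)
    (fun d => String.ofList (PySem.List.pyRepeat (PySem.Int.toStr d).toList
        (PySem.Int.floordiv (PySem.List.pyGetD (List.map (fun k => ((cntD S k : Nat) : Int)) (List.range 10)) d 0) 2)))
    (fun d => List.replicate (cntD S d.toNat / 2) (dch d.toNat))
    (List.map Nat.cast descD') hm h0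
  rw [hflat, List.flatMap_map]
  simp only [Int.toNat_natCast]
  have hzrep : (String.ofList (PySem.List.pyRepeat ['0'] ((cntD S 0 / 2 : Nat) : Int))).toList
      = List.replicate (cntD S 0 / 2) '0' := by
    rw [PySem.List.pyRepeat_singleton]; simp; omega
  rw [hzrep]
  have hifgen : ∀ A : List Char,
      (if ((cntD S 0 / 2 : Nat) : Int) ≠ 0 then A ++ List.replicate (cntD S 0 / 2) '0' else A)
        = A ++ List.replicate (cntD S 0 / 2) '0' := by
    intro A
    by_cases h : cntD S 0 / 2 = 0
    · simp [h]
    · simp [h]; omega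
  rw [hifgen]
  have hsplit : List.flatMap (fun d => List.replicate (cntD S d / 2) (dch d)) descD
      = (descD'.flatMap fun k => List.replicate (cntD S k / 2) (dch k))
          ++ List.replicate (cntD S 0 / 2) '0' := by
    rw [(by rfl : descD = descD' ++ [0]), List.flatMap_append]
    have h00 : dch 0 = '0' := by decide
    simp [h00]
  rw [← hsplit]
  rw [List.find?_map, List.find?_map]
  have hcen : List.find? ((fun d =>
        PySem.Int.mod (PySem.List.pyGetD (List.map (fun k => ((cntD S k : Nat) : Int)) (List.range 10)) d 0) 2 == 1) ∘ Nat.cast) descD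
      = List.find? (fun k => decide (cntD S k % 2 = 1)) descD := by
    apply find?_congr_mem
    intro k hk
    have hk10 : k < 10 := descD_lt k hk
    simp only [Function.comp_apply]
    rw [hget k hk10, hmd, beq_cast_one]
  have hpos : List.find? ((fun d =>
        decide (0 < PySem.List.pyGetD (List.map (fun k => ((cntD S k : Nat) : Int)) (List.range 10)) d 0)) ∘ Nat.cast) descD
      = List.find? (fun k => cntD S k != 0) descD := by
    apply find?_congr_mem
    intro k hk
    have hk10 : k < 10 := descD_lt k hk
    simp only [Function.comp_apply]
    rw [hget k hk10, decide_pos_cast]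
  rw [hcen, hpos]
  have hHfIhead : (List.flatMap (fun d => List.replicate (cntD S d / 2) ((d : Nat) : Int)) descD).head?
      = (descD.find? (fun d => cntD S d / 2 != 0)).map Nat.cast :=
    head?_flatMap_rep Nat.cast (fun d => cntD S d / 2) descD
  have hDfIhead : (List.flatMap (fun d => List.replicate (cntD S d) ((d : Nat) : Int)) descD).head?
      = (descD.find? (fun d => cntD S d != 0)).map Nat.cast :=
    head?_flatMap_rep Nat.cast (cntD S) descD
  have hLfIhead : (List.filterMap (fun d => if cntD S d % 2 = 1 then some ((d : Nat) : Int) else none) descD).head?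
      = (descD.find? (fun d => decide (cntD S d % 2 = 1))).map Nat.cast :=
    head?_filterMap Nat.cast (fun d => cntD S d % 2 = 1) descD
  have hFB : (match Option.map (Nat.cast : Nat → Int) (descD.find? fun k => cntD S k != 0) with
        | some d => PySem.Int.toStr d
        | none => "")
      = (match (List.flatMap (fun d => List.replicate (cntD S d) ((d : Nat) : Int)) descD) with
        | [] => ""
        | d0 :: _ => PySem.Int.toStr d0) := by
    cases hF : descD.find? (fun k => cntD S k != 0) with
    | none =>
      have hnil : (List.flatMap (fun d => List.replicate (cntD S d) ((d : Nat) : Int)) descD) = [] :=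
        List.head?_eq_none_iff.mp (by rw [hDfIhead, hF]; rfl)
      rw [hnil]
      rfl
    | some dm =>
      have hcons : (List.flatMap (fun d => List.replicate (cntD S d) ((d : Nat) : Int)) descD).head?
          = some ((dm : Nat) : Int) := by rw [hDfIhead, hF]; rfl
      rcases cons_of_head? hcons with ⟨t, ht⟩
      rw [ht]
      rfl
  have hleftB : (PySem.Str.join ""
        ((List.flatMap (fun d => List.replicate (cntD S d / 2) ((d : Nat) : Int)) descD).map PySem.Int.toStr)).toList
      = List.flatMap (fun d => List.replicate (cntD S d / 2) (dch d)) descD := by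
    rw [hjoin, List.map_map, flatten_map, flatMap_assoc']
    apply flatMap_congr_mem
    intro d hd
    have hd10 : d < 10 := descD_lt d hd
    exact flatMap_replicate_one _ _ (String.toList ∘ PySem.Int.toStr) (toStr_dch d hd10) _
  have hmideq : (match Option.map (Nat.cast : Nat → Int)
        (descD.find? fun k => decide (cntD S k % 2 = 1)) with
      | some d => PySem.Int.toStr d
      | none => "")
      = (match (List.filterMap (fun d => if cntD S d % 2 = 1 then some ((d : Nat) : Int) else none) descD) with
        | [] => ""
        | m0 :: _ => PySem.Int.toStr m0) := by
    cases hC : descD.find? (fun k => decide (cntD S k % 2 = 1)) with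
    | none =>
      have hnil : (List.filterMap (fun d => if cntD S d % 2 = 1 then some ((d : Nat) : Int) else none) descD) = [] :=
        List.head?_eq_none_iff.mp (by rw [hLfIhead, hC]; rfl)
      rw [hnil]
      rfl
    | some dc =>
      have hhc : (List.filterMap (fun d => if cntD S d % 2 = 1 then some ((d : Nat) : Int) else none) descD).head?
          = some ((dc : Nat) : Int) := by rw [hLfIhead, hC]; rfl
      rcases cons_of_head? hhc with ⟨u, hu⟩
      rw [hu]
      rfl
  cases hK : descD.find? (fun d => cntD S d / 2 != 0) with
  | none =>
    have hHf0 : (List.flatMap (fun d => List.replicate (cntD S d / 2) ((d : Nat) : Int)) descD) = [] :=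
      List.head?_eq_none_iff.mp (by rw [hHfIhead, hK]; rfl)
    have hall : ∀ k ∈ descD, cntD S k / 2 = 0 := by
      intro k hk
      have := List.find?_eq_none.mp hK k hk
      simpa using this
    have hsum0 : (List.map (fun k => ((cntD S k / 2 : Nat) : Int)) descD').sum = 0 := by
      apply List.sum_eq_zero
      intro x hx
      rcases List.mem_map.mp hx with ⟨k, hk, rfl⟩
      simp [hall k (descD'_sub k hk)]
    rw [if_neg (by rw [hsum0]; omega), hHf0]
    exact hFB
  | some dm =>
    have hdm_mem : dm ∈ descD := List.mem_of_find?_eq_some hK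
    have hdm10 : dm < 10 := descD_lt dm hdm_mem
    have hqd : cntD S dm / 2 ≠ 0 := by simpa using List.find?_some hK
    have hcons : (List.flatMap (fun d => List.replicate (cntD S d / 2) ((d : Nat) : Int)) descD).head?
        = some ((dm : Nat) : Int) := by rw [hHfIhead, hK]; rfl
    rcases cons_of_head? hcons with ⟨t, ht⟩
    rw [hleftB, hmideq, ht]
    by_cases hdm0 : dm = 0
    · subst hdm0
      have hall : ∀ k ∈ descD', cntD S k / 2 = 0 := by
        intro k hk
        have hkd : k ∈ descD := descD'_sub k hk
        have hk0 : 0 < k := by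
          have := (descD'_lt k hk).2
          omega
        have := find?_first _ descD descD_gt 0 hK k hkd hk0
        simpa using this
      have hsum0 : (List.map (fun k => ((cntD S k / 2 : Nat) : Int)) descD').sum = 0 := by
        apply List.sum_eq_zero
        intro x hx
        rcases List.mem_map.mp hx with ⟨k, hk, rfl⟩
        simp [hall k hk]
      rw [if_neg (by rw [hsum0]; omega)]
      simpa using hFB
    · have hne0 : ((dm : Nat) : Int) ≠ 0 := Nat.cast_ne_zero.mpr hdm0
      have hpos' : 0 < (List.map (fun k => ((cntD S k / 2 : Nat) : Int)) descD').sum := by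
        apply sum_pos_of_mem _ descD' (by intro d _; positivity) dm (mem_descD' dm hdm10 hdm0)
        exact_mod_cast Nat.pos_of_ne_zero hqd
      rw [if_pos hpos']
      simp only [hne0, ne_eq, not_false_eq_true, if_true]
      congr 1
      simp

-- ===== VERDICT (by name: the statement is the Claim_ definition above) =====
theorem solution_spec : Claim_equal_solution := by
  intro S _ hPre
  unfold Pre_solution at hPre
  show solution S = solution_alt S
  exact solution_eq_alt S (by simpa using hPre)
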